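-- pv_equiv track=rewrite | github.com/albertsokol/bunpo-check | permut8r/reconstructor.py | repaint_labels
-- ===== SOURCE A (Python) =====
-- def repaint_labels(error_indices, retok_length_indices):
--     """ Fill labels in the new, correct place for the valid portion of the label. """
--     result = [1] * len(retok_length_indices)
--     for error_index in error_indices:
--         for i, tok_index in enumerate(retok_length_indices):
--             if tok_index > error_index:
--                 result[i] = 2
--                 break
--     return result
-- ===== SOURCE B (Python) =====
-- def repaint_labels(error_indices, retok_length_indices):
--     """ Fill labels in the new, correct place for the valid portion of the label. """
--     # Positions reachable as "first index whose value exceeds e" are exactly the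
--     # strict prefix maxima; their values are strictly increasing, so binary search.
--     records = []  # (position, value) pairs of strict prefix maxima
--     for i, v in enumerate(retok_length_indices):
--         if not records or v > records[-1][1]:
--             records.append((i, v))
--     result = [1] * len(retok_length_indices)
--     for e in error_indices:
--         lo, hi = 0, len(records)
--         while lo < hi:  # first record index with value > e
--             mid = (lo + hi) // 2
--             if records[mid][1] > e:
--                 hi = mid
--             else:
--                 lo = mid + 1
--         if lo < len(records):
--             result[records[lo][0]] = 2
--     return result
-- ===== Notes on version B (the rewrite author's own statement) =====
-- stated objective: faster
-- what changed: Instead of rescanning the whole list for each error index, B precomputes the strict prefix-maximum records (the only positions a first-exceeding scan can return) once and binary-searches their strictly increasing values per error index.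
import Mathlib
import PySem

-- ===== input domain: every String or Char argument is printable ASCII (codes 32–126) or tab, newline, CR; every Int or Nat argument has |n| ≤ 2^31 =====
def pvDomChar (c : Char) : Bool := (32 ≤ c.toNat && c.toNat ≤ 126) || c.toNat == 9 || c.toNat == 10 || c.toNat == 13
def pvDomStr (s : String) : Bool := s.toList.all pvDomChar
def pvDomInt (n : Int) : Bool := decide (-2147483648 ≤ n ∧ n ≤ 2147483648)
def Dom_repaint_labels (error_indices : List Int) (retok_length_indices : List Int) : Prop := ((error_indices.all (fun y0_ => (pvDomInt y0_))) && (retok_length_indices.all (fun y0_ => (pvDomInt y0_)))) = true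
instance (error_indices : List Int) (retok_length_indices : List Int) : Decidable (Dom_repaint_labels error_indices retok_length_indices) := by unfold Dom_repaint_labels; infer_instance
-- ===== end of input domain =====

-- B replaces A's per-error rescan of the whole list by a once-built prefix-maximum
-- record list plus a binary search per error index (objective: faster).

-- ===== PORT A =====
-- inner 'for i, tok_index in enumerate(...): if tok_index > error_index: result[i] = 2; break'
def pvScanA (e : Int) : List (Int × Int) → List Int → List Int
  | [], res => res
  | (i, tok) :: rest, res => if tok > e then res.set i.toNat 2 else pvScanA e rest res

def repaint_labels (error_indices : List Int) (retok_length_indices : List Int) : List Int :=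
  error_indices.foldl
    (fun res e => pvScanA e (PySem.List.enumerate retok_length_indices) res)
    (List.replicate retok_length_indices.length 1)

-- ===== PORT B =====
-- 'if not records or v > records[-1][1]: records.append((i, v))'
def pvStepRec (recs : List (Int × Int)) (p : Int × Int) : List (Int × Int) :=
  match recs.getLast? with
  | none => recs ++ [p]
  | some q => if p.2 > q.2 then recs ++ [p] else recs

def pvRecords (retok : List Int) : List (Int × Int) :=
  (PySem.List.enumerate retok).foldl pvStepRec []

-- the while-loop binary search, fuel = hi - lo (strictly decreasing, so never exhausted):
-- first k in [lo, hi) with records[k][1] > e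
def pvBSearchF (recs : List (Int × Int)) (e : Int) : Nat → Nat → Nat → Nat
  | 0, lo, _ => lo
  | fuel + 1, lo, hi =>
    if lo < hi then
      let mid := (lo + hi) / 2
      if (recs.getD mid (0, 0)).2 > e then pvBSearchF recs e fuel lo mid
      else pvBSearchF recs e fuel (mid + 1) hi
    else lo

def pvBSearch (recs : List (Int × Int)) (e : Int) (lo hi : Nat) : Nat :=
  pvBSearchF recs e (hi - lo) lo hi

def repaint_labels_alt (error_indices : List Int) (retok_length_indices : List Int) : List Int :=
  let recs := pvRecords retok_length_indices
  error_indices.foldl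
    (fun res e =>
      let lo := pvBSearch recs e 0 recs.length
      if lo < recs.length then res.set (recs.getD lo (0, 0)).1.toNat 2 else res)
    (List.replicate retok_length_indices.length 1)

-- ===== PRECONDITION & SPEC =====
def Spec_repaint_labels (error_indices : List Int) (retok_length_indices : List Int) (out : List Int) : Prop := out = repaint_labels_alt error_indices retok_length_indices
instance (error_indices : List Int) (retok_length_indices : List Int) (out : List Int) : Decidable (Spec_repaint_labels error_indices retok_length_indices out) := by unfold Spec_repaint_labels; infer_instance

-- ===== CLAIM (what is proved, stated in full; the proofs are below) =====
def Claim_equal_repaint_labels : Prop := ∀ (error_indices : List Int) (retok_length_indices : List Int), Dom_repaint_labels error_indices retok_length_indices → Spec_repaint_labels error_indices retok_length_indices (repaint_labels error_indices retok_length_indices)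

-- ===== LEMMAS AND PROOFS =====

-- A's inner scan returns result of the first element with tok > e
theorem scanA_eq_find (e : Int) (l : List (Int × Int)) (res : List Int) :
    pvScanA e l res =
      match l.find? (fun p => decide (p.2 > e)) with
      | some p => res.set p.1.toNat 2
      | none => res := by
  induction l with
  | nil => simp [pvScanA, List.find?]
  | cons a t ih =>
    obtain ⟨i, tok⟩ := a
    by_cases h : tok > e
    · simp [pvScanA, List.find?, h]
    · simp [pvScanA, List.find?, h, ih]

-- every element of a strictly .2-sorted list is ≤ its last element
theorem le_last_of_sorted {l : List (Int × Int)} {q a : Int × Int}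
    (hs : l.Pairwise (fun a b => a.2 < b.2)) (hq : l.getLast? = some q) (ha : a ∈ l) :
    a.2 ≤ q.2 := by
  rw [List.getLast?_eq_getElem?] at hq
  obtain ⟨i, hi, rfl⟩ := List.mem_iff_getElem.mp ha
  rw [List.pairwise_iff_getElem] at hs
  have hlen : l.length - 1 < l.length := by omega
  have hq' : l[l.length - 1] = q := by
    have := List.getElem?_eq_getElem hlen
    rw [this] at hq; exact Option.some.inj hq
  by_cases h : i < l.length - 1
  · have := hs i (l.length - 1) hi hlen h
    rw [hq'] at this; omega
  · have : i = l.length - 1 := by omega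
    subst this; rw [hq']

-- the record list is strictly increasing in .2 and preserves first-match search
theorem records_inv (l : List (Int × Int)) :
    (l.foldl pvStepRec []).Pairwise (fun a b => a.2 < b.2) ∧
    (∀ e : Int, (l.foldl pvStepRec []).find? (fun p => decide (p.2 > e)) =
      l.find? (fun p => decide (p.2 > e))) := by
  induction l using List.reverseRecOn with
  | nil => simp
  | append_singleton t x ih =>
    obtain ⟨hs, hf⟩ := ih
    rw [List.foldl_append, List.foldl_cons, List.foldl_nil]
    set R := t.foldl pvStepRec [] with hR
    cases hlast : R.getLast? with
    | none =>
      have hRnil : R = [] := List.getLast?_eq_none_iff.mp hlast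
      constructor
      · simp [pvStepRec, hRnil]
      · intro e
        have hnone : t.find? (fun p => decide (p.2 > e)) = none := by
          rw [← hf e, hRnil]; simp
        simp [pvStepRec, hRnil, List.find?_append, hnone]
    | some q =>
      by_cases hx : x.2 > q.2
      · constructor
        · rw [pvStepRec, hlast]; simp only [hx, if_pos]
          rw [List.pairwise_append]
          refine ⟨hs, by simp, ?_⟩
          intro a ha b hb
          simp at hb; subst hb
          exact lt_of_le_of_lt (le_last_of_sorted hs hlast ha) hx
        · intro e
          rw [pvStepRec, hlast]; simp only [hx, if_pos]
          rw [List.find?_append, List.find?_append, hf e]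
      · constructor
        · rw [pvStepRec, hlast]; simp [hx]; exact hs
        · intro e
          rw [pvStepRec, hlast]; simp only [hx, if_false]
          rw [List.find?_append, hf e]
          cases hft : t.find? (fun p => decide (p.2 > e)) with
          | some r => simp
          | none =>
            have hRn : R.find? (fun p => decide (p.2 > e)) = none := by rw [hf e, hft]
            have hall := List.find?_eq_none.mp hRn
            have hqmem : q ∈ R := List.mem_of_getLast? hlast
            have hqle : ¬ (q.2 > e) := by simpa using hall q hqmem
            have hxe : ¬ (x.2 > e) := by omega
            simp [List.find?, hxe]

-- binary search on a strictly sorted record list finds the first index with value > e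
theorem bsearchF_spec (recs : List (Int × Int)) (e : Int)
    (mono : ∀ k k' : Nat, k ≤ k' → k' < recs.length →
      e < (recs.getD k (0, 0)).2 → e < (recs.getD k' (0, 0)).2) :
    ∀ (fuel lo hi : Nat), hi - lo ≤ fuel → lo ≤ hi → hi ≤ recs.length →
    (∀ k, k < lo → ¬ e < (recs.getD k (0, 0)).2) →
    (∀ k, hi ≤ k → k < recs.length → e < (recs.getD k (0, 0)).2) →
    (∀ k, k < pvBSearchF recs e fuel lo hi → ¬ e < (recs.getD k (0, 0)).2) ∧
    (pvBSearchF recs e fuel lo hi < recs.length →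
      e < (recs.getD (pvBSearchF recs e fuel lo hi) (0, 0)).2) ∧
    pvBSearchF recs e fuel lo hi ≤ hi := by
  intro fuel
  induction fuel with
  | zero =>
    intro lo hi hf hle hhi h1 h2
    have : lo = hi := by omega
    subst this
    rw [pvBSearchF]
    exact ⟨h1, fun hlt => h2 lo (by omega) hlt, by omega⟩
  | succ f ih =>
    intro lo hi hf hle hhi h1 h2
    by_cases h : lo < hi
    · rw [pvBSearchF]
      simp only [h, if_pos]
      by_cases hpm : (recs.getD ((lo + hi) / 2) (0, 0)).2 > e
      · rw [if_pos hpm]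
        obtain ⟨c1, c2, c3⟩ := ih lo ((lo + hi) / 2) (by omega) (by omega) (by omega) h1
          (fun k hk hklen => mono ((lo + hi) / 2) k hk hklen hpm)
        exact ⟨c1, c2, by omega⟩
      · rw [if_neg hpm]
        refine ih ((lo + hi) / 2 + 1) hi (by omega) (by omega) hhi ?_ h2
        intro k hk
        by_cases hkl : k < lo
        · exact h1 k hkl
        · intro hpk
          exact hpm (mono k ((lo + hi) / 2) (by omega) (by omega) hpk)
    · rw [pvBSearchF]
      simp only [h, if_false]
      exact ⟨h1, fun hlt => h2 lo (by omega) hlt, by omega⟩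

theorem bsearch_spec (recs : List (Int × Int)) (e : Int)
    (mono : ∀ k k' : Nat, k ≤ k' → k' < recs.length →
      e < (recs.getD k (0, 0)).2 → e < (recs.getD k' (0, 0)).2)
    (lo hi : Nat) (hle : lo ≤ hi) (hhi : hi ≤ recs.length)
    (h1 : ∀ k, k < lo → ¬ e < (recs.getD k (0, 0)).2)
    (h2 : ∀ k, hi ≤ k → k < recs.length → e < (recs.getD k (0, 0)).2) :
    (∀ k, k < pvBSearch recs e lo hi → ¬ e < (recs.getD k (0, 0)).2) ∧
    (pvBSearch recs e lo hi < recs.length →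
      e < (recs.getD (pvBSearch recs e lo hi) (0, 0)).2) ∧
    pvBSearch recs e lo hi ≤ hi :=
  bsearchF_spec recs e mono (hi - lo) lo hi (by omega) hle hhi h1 h2

theorem find?_first (pb : Int × Int → Bool) (l : List (Int × Int)) :
    ∀ (r : Nat), r < l.length → (∀ k, k < r → pb (l.getD k (0, 0)) = false) →
    pb (l.getD r (0, 0)) = true → l.find? pb = some (l.getD r (0, 0)) := by
  induction l with
  | nil => intro r hr; simp at hr
  | cons a t ih =>
    intro r hr hk hp
    cases r with
    | zero =>
      simp only [List.getD_cons_zero] at hp ⊢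
      exact List.find?_cons_of_pos hp
    | succ n =>
      have ha := hk 0 (by omega)
      simp only [List.getD_cons_zero] at ha
      rw [List.find?_cons_of_neg (by simp [ha])]
      simp only [List.getD_cons_succ] at hp ⊢
      exact ih n (by simpa using hr) (fun k hk' => by
        have := hk (k + 1) (by omega); simpa using this) hp

-- per-error step: A's linear scan equals B's record binary search
theorem step_eq (retok : List Int) (e : Int) (res : List Int) :
    pvScanA e (PySem.List.enumerate retok) res =
      (let recs := pvRecords retok
       let lo := pvBSearch recs e 0 recs.length
       if lo < recs.length then res.set (recs.getD lo (0, 0)).1.toNat 2 else res) := by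
  obtain ⟨hs, hf⟩ := records_inv (PySem.List.enumerate retok)
  have hrecs : pvRecords retok = (PySem.List.enumerate retok).foldl pvStepRec [] := rfl
  rw [← hrecs] at hs hf
  set recs := pvRecords retok with hR
  have hmono : ∀ k k' : Nat, k ≤ k' → k' < recs.length →
      e < (recs.getD k (0, 0)).2 → e < (recs.getD k' (0, 0)).2 := by
    intro k k' hkk hk' hp
    rcases Nat.lt_or_ge k k' with hlt | hge
    · have hk : k < recs.length := by omega
      have := (List.pairwise_iff_getElem.mp hs) k k' hk hk' hlt
      rw [List.getD_eq_getElem _ _ hk] at hp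
      rw [List.getD_eq_getElem _ _ hk']
      omega
    · have : k = k' := by omega
      subst this; exact hp
  obtain ⟨c1, c2, c3⟩ := bsearch_spec recs e hmono 0 recs.length (by omega) le_rfl
    (by omega) (by omega)
  rw [scanA_eq_find, ← hf e]
  by_cases hlt : pvBSearch recs e 0 recs.length < recs.length
  · rw [find?_first _ recs _ hlt
      (fun k hk => decide_eq_false (by simpa using c1 k hk)) (by simpa using c2 hlt)]
    simp [hlt]
  · have hnone : recs.find? (fun p => decide (p.2 > e)) = none := by
      apply List.find?_eq_none.mpr
      intro x hx
      obtain ⟨i, hi, rfl⟩ := List.mem_iff_getElem.mp hx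
      have := c1 i (by omega)
      rw [List.getD_eq_getElem _ _ hi] at this
      simpa using this
    rw [hnone]
    simp [hlt]

-- ===== VERDICT =====
theorem repaint_labels_spec : Claim_equal_repaint_labels := by
  intro errs retok _
  unfold Spec_repaint_labels repaint_labels repaint_labels_alt
  exact congrArg (fun f => List.foldl f (List.replicate retok.length 1) errs)
    (funext fun res => funext fun e => step_eq retok e res)
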